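-- pv_equiv track=rewrite | github.com/algorithm-study-2021/Algorithm_Study_2021 | 김하영/week07.py | solution
-- ===== SOURCE A (Python) =====
-- def solution(s):
--     answer = [0, 0]
--     while s != '1':
--         answer[1] += s.count('0')
--         c = s.count('1')
--         s = ''
--         while c>0:
--             s = s + str(c%2)
--             c = c//2
--         answer[0] += 1
--     return answer
-- ===== SOURCE B (Python) =====
-- def solution(s):
--     # Bottom-up dynamic programming: tabulate, for every possible one-count value v,
--     # the (steps, zeros) accumulated from the pure-binary representation of v down to 1,
--     # then answer with one table lookup for the original string's one-count.
--     if s == '1':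
--         return [0, 0]
--     c = s.count('1')
--     steps = [0, 0]   # steps[v]: transform steps from binary(v) until '1' (v = 0, 1 base rows)
--     zeros = [0, 0]   # zeros[v]: zeros removed along the way
--     for v in range(2, c + 1):
--         p = bin(v).count('1')      # p < v, already tabulated
--         steps.append(steps[p] + 1)
--         zeros.append(zeros[p] + v.bit_length() - p)
--     return [steps[c] + 1, zeros[c] + s.count('0')]
-- ===== Notes on version B (the rewrite author's own statement) =====
-- stated objective: alternative
-- what changed: B replaces A's simulation loop (repeatedly rebuilding the binary string and recounting it) with bottom-up dynamic programming: it tabulates, for every one-count value v up to the original string's one-count c, the total steps and removed zeros from binary(v) down to '1' (each row filled from the already-computed row at popcount(v)), then answers with a single table lookup at c.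
import Mathlib
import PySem

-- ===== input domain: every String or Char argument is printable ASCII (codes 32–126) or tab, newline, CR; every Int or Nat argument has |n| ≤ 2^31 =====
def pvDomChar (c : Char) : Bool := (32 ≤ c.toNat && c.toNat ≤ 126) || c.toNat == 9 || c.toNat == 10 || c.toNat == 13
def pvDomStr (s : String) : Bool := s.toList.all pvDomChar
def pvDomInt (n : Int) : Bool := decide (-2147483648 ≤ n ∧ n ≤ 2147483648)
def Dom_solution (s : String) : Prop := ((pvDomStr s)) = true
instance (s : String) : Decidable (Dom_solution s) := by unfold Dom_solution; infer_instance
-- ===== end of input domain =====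

-- B replaces A's step-by-step simulation with a bottom-up DP table over one-count values;
-- return-value equivalence proved on Pre_ (strings containing a '1', exactly where A terminates).

-- ===== PORT A =====
-- inner 'while c>0' loop; the Nat fuel (c.toNat suffices) only makes the same computation total
def pvAInner : Nat → Int → List Char → List Char
  | 0, _, s => s
  | f+1, c, s =>
    if 0 < c then pvAInner f (PySem.Int.floordiv c 2) (s ++ (PySem.Int.toStr (PySem.Int.mod c 2)).toList)
    else s

-- outer 'while s != "1"' loop; fuel (length+2 suffices on Pre_) only makes it total
def pvAOuter : Nat → List Char → Int → Int → List Int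
  | 0, _, a0, a1 => [a0, a1]
  | f+1, s, a0, a1 =>
    if s = ['1'] then [a0, a1]
    else
      let a1' := a1 + (PySem.Chars.count s ['0'] : Int)
      let c : Int := (PySem.Chars.count s ['1'] : Int)
      pvAOuter f (pvAInner c.toNat c []) (a0 + 1) a1'

def solution (s : String) : List Int := pvAOuter (s.toList.length + 2) s.toList 0 0

-- ===== PORT B =====
-- one iteration of Source B's 'for v in range(2, c+1)' table-filling loop; the Python indexings
-- steps[p], zeros[p] are always in range (p = popcount(v) < v), so pyGetD is exact here
def pvBStep (st : List Int × List Int) (v : Int) : List Int × List Int :=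
  let p : Nat := PySem.Int.bitCount v
  (st.1 ++ [PySem.List.pyGetD st.1 (p : Int) 0 + 1],
   st.2 ++ [PySem.List.pyGetD st.2 (p : Int) 0 + (PySem.Int.bitLength v : Int) - (p : Int)])

def solution_alt (s : String) : List Int :=
  if s.toList = ['1'] then [0, 0]
  else
    let c : Int := (PySem.Chars.count s.toList ['1'] : Int)
    let tab := (PySem.List.pyRange 2 (c + 1) 1).foldl pvBStep ([0, 0], [0, 0])
    [PySem.List.pyGetD tab.1 c 0 + 1,
     PySem.List.pyGetD tab.2 c 0 + (PySem.Chars.count s.toList ['0'] : Int)]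

-- ===== PRECONDITION & SPEC =====
-- Pre_ requires the character 1 to occur in s: on any other string A's outer loop never
-- terminates (the ones count stays 0 and the rebuilt string is empty), so A returns on no excluded input.
def Pre_solution (s : String) : Prop := '1' ∈ s.toList
instance (s : String) : Decidable (Pre_solution s) := by unfold Pre_solution; infer_instance
def pvWitness_solution : String := "110"

def Spec_solution (s : String) (out : List Int) : Prop := out = solution_alt s
instance (s : String) (out : List Int) : Decidable (Spec_solution s out) := by unfold Spec_solution; infer_instance

-- ===== CLAIM (what is proved, stated in full; the proofs are below) =====
def Claim_equal_solution : Prop := ∀ (s : String), Dom_solution s → Pre_solution s → Spec_solution s (solution s)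

-- ===== LEMMAS AND PROOFS =====

-- PySem.Chars.count with a single-character needle is List.count
lemma chars_count_go_single (c : Char) :
    ∀ (f : Nat) (l : List Char) (acc : Nat), l.length ≤ f →
      PySem.Chars.count.go [c] f l acc = acc + l.count c := by
  intro f
  induction f with
  | zero =>
    intro l acc h
    have : l = [] := List.eq_nil_of_length_eq_zero (Nat.le_zero.mp h)
    subst this; rfl
  | succ f ih =>
    intro l acc h
    cases l with
    | nil => rfl
    | cons a t =>
      simp only [PySem.Chars.count.go, List.isPrefixOf]
      by_cases hca : c = a
      · subst hca
        simp only [BEq.rfl, Bool.true_and, if_pos, List.length_cons, List.length_nil,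
          List.drop_succ_cons, List.drop_zero]
        rw [ih t (acc + 1) (by simpa using Nat.lt_succ_iff.mp (by simpa using h))]
        simp
        omega
      · have : (c == a) = false := by simp [hca]
        simp only [this, Bool.false_and, if_neg Bool.false_ne_true]
        rw [ih t acc (by simpa using Nat.lt_succ_iff.mp (by simpa using h))]
        simp [Ne.symm hca]

lemma chars_count_single (l : List Char) (c : Char) :
    PySem.Chars.count l [c] = l.count c := by
  have := chars_count_go_single c l.length l 0 le_rfl
  simpa [PySem.Chars.count] using this

lemma bitLength_eq_zero (c : Int) (h0 : 0 ≤ c) (h : PySem.Int.bitLength c = 0) : c = 0 := by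
  have := PySem.Int.lt_two_pow_bitLength c
  rw [h] at this
  omega

lemma bitCount_pos_nat : ∀ (n : Nat), 0 < n → 0 < PySem.Int.bitCount (n : Int) := by
  intro n
  induction n using Nat.strong_induction_on with
  | _ n ih =>
    intro hn
    rw [PySem.Int.bitCount_natCast hn]
    by_cases h2 : n % 2 = 1
    · omega
    · have h2' : n / 2 > 0 := by omega
      have := ih (n / 2) (by omega) h2'
      omega

lemma bitCount_le_nat : ∀ (n : Nat), PySem.Int.bitCount (n : Int) ≤ n := by
  intro n
  induction n using Nat.strong_induction_on with
  | _ n ih =>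
    by_cases hn : n = 0
    · subst hn; simp
    · rw [PySem.Int.bitCount_natCast (show 0 < n by omega)]
      have := ih (n / 2) (by omega)
      omega

-- popcount strictly decreases: the key fact for both the DP fill order and A's termination
lemma bitCount_lt_nat (n : Nat) (h : 2 ≤ n) : PySem.Int.bitCount (n : Int) < n := by
  rw [PySem.Int.bitCount_natCast (show 0 < n by omega)]
  have := bitCount_le_nat (n / 2)
  omega

lemma bitLength_ge_two (c : Int) (h : 2 ≤ c) : 2 ≤ PySem.Int.bitLength c := by
  by_contra hlt
  have hb := PySem.Int.lt_two_pow_bitLength c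
  have h1 : PySem.Int.bitLength c ≤ 1 := by omega
  have : (2 : Nat) ^ PySem.Int.bitLength c ≤ 2 ^ 1 := Nat.pow_le_pow_right (by norm_num) h1
  have : c.natAbs < 2 := by omega
  omega

lemma mod_two_cases (c : Int) : PySem.Int.mod c 2 = 0 ∨ PySem.Int.mod c 2 = 1 := by
  have h1 := PySem.Int.mod_nonneg c (b := 2) (by norm_num)
  have h2 := PySem.Int.mod_lt c (b := 2) (by norm_num)
  omega

lemma floordiv_two_nonneg (c : Int) (h : 0 ≤ c) : 0 ≤ PySem.Int.floordiv c 2 := by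
  rw [PySem.Int.floordiv_eq_ediv_of_pos (by norm_num)]
  omega

-- the three facts about the string A's inner loop builds (reversed binary of c)
lemma pvAInner_count1 :
    ∀ (f : Nat) (c : Int) (acc : List Char), 0 ≤ c → PySem.Int.bitLength c ≤ f →
      (pvAInner f c acc).count '1' = acc.count '1' + PySem.Int.bitCount c := by
  intro f
  induction f with
  | zero =>
    intro c acc h0 hf
    have : c = 0 := bitLength_eq_zero c h0 (Nat.le_zero.mp hf)
    subst this; simp [pvAInner]
  | succ f ih =>
    intro c acc h0 hf
    by_cases hc : 0 < c
    · have hbl := PySem.Int.bitLength_of_pos hc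
      have hbc := PySem.Int.bitCount_of_pos hc
      have hd0 : 0 ≤ PySem.Int.floordiv c 2 := floordiv_two_nonneg c h0
      have hdf : PySem.Int.bitLength (PySem.Int.floordiv c 2) ≤ f := by omega
      have hih := ih (PySem.Int.floordiv c 2)
        (acc ++ (PySem.Int.toStr (PySem.Int.mod c 2)).toList) hd0 hdf
      simp only [pvAInner, if_pos hc]
      rw [hih]
      rcases mod_two_cases c with hm | hm <;> rw [hm] at hbc ⊢ <;>
        simp only [show (PySem.Int.toStr 0).toList = ['0'] by decide,
          show (PySem.Int.toStr 1).toList = ['1'] by decide, List.count_append,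
          show List.count '1' ['0'] = 0 by decide,
          show List.count '1' ['1'] = 1 by decide] <;> omega
    · have : c = 0 := by omega
      subst this; simp [pvAInner]

lemma pvAInner_count0 :
    ∀ (f : Nat) (c : Int) (acc : List Char), 0 ≤ c → PySem.Int.bitLength c ≤ f →
      (pvAInner f c acc).count '0' =
        acc.count '0' + (PySem.Int.bitLength c - PySem.Int.bitCount c) := by
  intro f
  induction f with
  | zero =>
    intro c acc h0 hf
    have : c = 0 := bitLength_eq_zero c h0 (Nat.le_zero.mp hf)
    subst this; simp [pvAInner]
  | succ f ih =>
    intro c acc h0 hf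
    by_cases hc : 0 < c
    · have hbl := PySem.Int.bitLength_of_pos hc
      have hbc := PySem.Int.bitCount_of_pos hc
      have hd0 : 0 ≤ PySem.Int.floordiv c 2 := floordiv_two_nonneg c h0
      have hdf : PySem.Int.bitLength (PySem.Int.floordiv c 2) ≤ f := by omega
      have hle := PySem.Int.bitCount_le_bitLength (PySem.Int.floordiv c 2)
      have hih := ih (PySem.Int.floordiv c 2)
        (acc ++ (PySem.Int.toStr (PySem.Int.mod c 2)).toList) hd0 hdf
      simp only [pvAInner, if_pos hc]
      rw [hih]
      rcases mod_two_cases c with hm | hm <;> rw [hm] at hbc ⊢ <;>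
        simp only [show (PySem.Int.toStr 0).toList = ['0'] by decide,
          show (PySem.Int.toStr 1).toList = ['1'] by decide, List.count_append,
          show List.count '0' ['0'] = 1 by decide,
          show List.count '0' ['1'] = 0 by decide] <;> omega
    · have : c = 0 := by omega
      subst this; simp [pvAInner]

lemma pvAInner_length :
    ∀ (f : Nat) (c : Int) (acc : List Char), 0 ≤ c → PySem.Int.bitLength c ≤ f →
      (pvAInner f c acc).length = acc.length + PySem.Int.bitLength c := by
  intro f
  induction f with
  | zero =>
    intro c acc h0 hf
    have : c = 0 := bitLength_eq_zero c h0 (Nat.le_zero.mp hf)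
    subst this; simp [pvAInner]
  | succ f ih =>
    intro c acc h0 hf
    by_cases hc : 0 < c
    · have hbl := PySem.Int.bitLength_of_pos hc
      have hd0 : 0 ≤ PySem.Int.floordiv c 2 := floordiv_two_nonneg c h0
      have hdf : PySem.Int.bitLength (PySem.Int.floordiv c 2) ≤ f := by omega
      have hih := ih (PySem.Int.floordiv c 2)
        (acc ++ (PySem.Int.toStr (PySem.Int.mod c 2)).toList) hd0 hdf
      simp only [pvAInner, if_pos hc]
      rw [hih]
      rcases mod_two_cases c with hm | hm <;> rw [hm] <;>
        simp only [show (PySem.Int.toStr 0).toList = ['0'] by decide,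
          show (PySem.Int.toStr 1).toList = ['1'] by decide, List.length_append,
          List.length_cons, List.length_nil] <;> omega
    · have : c = 0 := by omega
      subst this; simp [pvAInner]

lemma bitLength_le_nat : ∀ (n : Nat), PySem.Int.bitLength (n : Int) ≤ n := by
  intro n
  induction n using Nat.strong_induction_on with
  | _ n ih =>
    by_cases hn : n = 0
    · subst hn; simp
    · rw [PySem.Int.bitLength_natCast (show 0 < n by omega)]
      have := ih (n / 2) (by omega)
      omega

lemma bitLength_le_toNat (c : Int) (h : 0 ≤ c) : PySem.Int.bitLength c ≤ c.toNat := by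
  have := bitLength_le_nat c.toNat
  rwa [Int.toNat_of_nonneg h] at this

-- reference chain: (steps, zeros) accumulated from the pure-binary string of n until '1'
def chainSZ : Nat → Int × Int
  | n =>
    if h : n ≤ 1 then (0, 0)
    else
      let p := PySem.Int.bitCount (n : Int)
      have : p < n := bitCount_lt_nat n (by omega)
      let r := chainSZ p
      (r.1 + 1, r.2 + ((PySem.Int.bitLength (n : Int) : Int) - (p : Int)))
  termination_by n => n

lemma chainSZ_base (n : Nat) (h : n ≤ 1) : chainSZ n = (0, 0) := by
  rw [chainSZ.eq_def]; simp [h]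

lemma chainSZ_step (n : Nat) (h : 2 ≤ n) :
    chainSZ n = ((chainSZ (PySem.Int.bitCount (n : Int))).1 + 1,
      (chainSZ (PySem.Int.bitCount (n : Int))).2 +
        ((PySem.Int.bitLength (n : Int) : Int) - (PySem.Int.bitCount (n : Int) : Int))) := by
  rw [chainSZ.eq_def]; simp [show ¬ n ≤ 1 by omega]

-- one unfolding of A's outer loop in the non-'1' case
lemma pvAOuter_step (f : Nat) (s : List Char) (a0 a1 : Int) (h : s ≠ ['1']) :
    pvAOuter (f + 1) s a0 a1 =
      pvAOuter f (pvAInner ((PySem.Chars.count s ['1'] : Int)).toNat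
          (PySem.Chars.count s ['1'] : Int) []) (a0 + 1)
        (a1 + (PySem.Chars.count s ['0'] : Int)) := by
  simp [pvAOuter, if_neg h]

-- A's outer loop from the binary string of c computes the chain values
lemma A_loop :
    ∀ (f : Nat) (c a0 a1 : Int), 1 ≤ c → c.toNat ≤ f →
      pvAOuter f (pvAInner c.toNat c []) a0 a1 =
        [a0 + (chainSZ c.toNat).1, a1 + (chainSZ c.toNat).2] := by
  intro f
  induction f with
  | zero => intro c a0 a1 hc hf; omega
  | succ f ih =>
    intro c a0 a1 hc hf
    by_cases hc1 : c = 1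
    · subst hc1
      have hi : pvAInner 1 (1 : Int) [] = ['1'] := by decide
      have hcz : chainSZ 1 = (0, 0) := by rw [chainSZ.eq_def]; norm_num
      simp [pvAOuter, hi, hcz]
    · have hc2 : 2 ≤ c := by omega
      have h0 : (0 : Int) ≤ c := by omega
      have hfuel : PySem.Int.bitLength c ≤ c.toNat := bitLength_le_toNat c h0
      have hlen := pvAInner_length c.toNat c [] h0 hfuel
      have hcnt1 := pvAInner_count1 c.toNat c [] h0 hfuel
      have hcnt0 := pvAInner_count0 c.toNat c [] h0 hfuel
      have hne : pvAInner c.toNat c [] ≠ ['1'] := by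
        intro he
        rw [he] at hlen
        have := bitLength_ge_two c hc2
        simp at hlen
        omega
      have hcn2 : 2 ≤ c.toNat := by omega
      have hbclt : PySem.Int.bitCount c < c.toNat := by
        have := bitCount_lt_nat c.toNat hcn2
        rwa [Int.toNat_of_nonneg h0] at this
      have hbcpos : 0 < PySem.Int.bitCount c := by
        have := bitCount_pos_nat c.toNat (by omega)
        rwa [Int.toNat_of_nonneg h0] at this
      have hble := PySem.Int.bitCount_le_bitLength c
      simp only [pvAOuter, if_neg hne, chars_count_single, hcnt1, hcnt0, List.count_nil,
        Nat.zero_add]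
      have hIH := ih ((PySem.Int.bitCount c : Int)) (a0 + 1)
        (a1 + ((PySem.Int.bitLength c - PySem.Int.bitCount c : Nat) : Int))
        (by exact_mod_cast hbcpos) (by simp; omega)
      rw [Int.toNat_natCast] at hIH
      rw [Int.toNat_natCast, hIH]
      have hcc : c.toNat = c.toNat := rfl
      have hbc_eq : PySem.Int.bitCount ((c.toNat : Nat) : Int) = PySem.Int.bitCount c := by
        rw [Int.toNat_of_nonneg h0]
      have hbl_eq : PySem.Int.bitLength ((c.toNat : Nat) : Int) = PySem.Int.bitLength c := by
        rw [Int.toNat_of_nonneg h0]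
      rw [chainSZ_step c.toNat hcn2, hbc_eq, hbl_eq]
      have : ((PySem.Int.bitLength c - PySem.Int.bitCount c : Nat) : Int)
          = (PySem.Int.bitLength c : Int) - (PySem.Int.bitCount c : Int) := by
        omega
      rw [this]
      simp only [List.cons.injEq, and_true]
      constructor <;> ring

-- the DP table built by B's loop: lengths and contents
lemma B_tab (n : Nat) (h1 : 1 ≤ n) :
    ((PySem.List.pyRange 2 ((n : Int) + 1) 1).foldl pvBStep ([0, 0], [0, 0])).1.length = n + 1 ∧
    ((PySem.List.pyRange 2 ((n : Int) + 1) 1).foldl pvBStep ([0, 0], [0, 0])).2.length = n + 1 ∧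
    ∀ j : Nat, j ≤ n →
      ((PySem.List.pyRange 2 ((n : Int) + 1) 1).foldl pvBStep ([0, 0], [0, 0])).1.getD j 0
          = (chainSZ j).1 ∧
      ((PySem.List.pyRange 2 ((n : Int) + 1) 1).foldl pvBStep ([0, 0], [0, 0])).2.getD j 0
          = (chainSZ j).2 := by
  induction n with
  | zero => omega
  | succ n ih =>
    by_cases hn1 : n = 0
    · subst hn1
      rw [show ((0:Nat)+1 : Nat) = 1 from rfl]
      rw [PySem.List.pyRange_one_eq_nil (by norm_num)]
      refine ⟨rfl, rfl, ?_⟩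
      intro j hj
      interval_cases j <;> simp [chainSZ_base]
    · have hn : 1 ≤ n := by omega
      obtain ⟨hl1, hl2, hv⟩ := ih hn
      have hsplit : PySem.List.pyRange 2 (((n + 1 : Nat) : Int) + 1) 1
          = PySem.List.pyRange 2 ((n : Int) + 1) 1 ++ [(n : Int) + 1] := by
        have := PySem.List.pyRange_one_succ_right (a := 2) (b := (n : Int) + 1)
          (by exact_mod_cast by omega)
        push_cast
        push_cast at this
        convert this using 2
      rw [hsplit, List.foldl_append]
      simp only [List.foldl_cons, List.foldl_nil]
      set tab := (PySem.List.pyRange 2 ((n : Int) + 1) 1).foldl pvBStep ([0, 0], [0, 0]) with htab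
      have hp : PySem.Int.bitCount ((n : Int) + 1) = PySem.Int.bitCount (((n+1 : Nat)) : Int) := by
        norm_cast
      have hplt : PySem.Int.bitCount ((n : Int) + 1) < n + 1 := by
        rw [hp]; exact bitCount_lt_nat (n+1) (by omega)
      set p := PySem.Int.bitCount ((n : Int) + 1) with hpdef
      have hple : p ≤ n := by omega
      obtain ⟨he1, he2⟩ := hv p hple
      have hstep : pvBStep tab ((n : Int) + 1)
          = (tab.1 ++ [(chainSZ p).1 + 1],
             tab.2 ++ [(chainSZ p).2 + (PySem.Int.bitLength ((n : Int) + 1) : Int) - (p : Int)]) := by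
        simp only [pvBStep, ← hpdef, PySem.List.pyGetD_natCast, he1, he2]
      rw [hstep]
      refine ⟨by simp [hl1], by simp [hl2], ?_⟩
      intro j hj
      by_cases hjn : j ≤ n
      · have hj1 : j < tab.1.length := by omega
        have hj2 : j < tab.2.length := by omega
        obtain ⟨hv1, hv2⟩ := hv j hjn
        constructor
        · rw [List.getD_eq_getElem?_getD, List.getElem?_append_left hj1,
            ← List.getD_eq_getElem?_getD, hv1]
        · rw [List.getD_eq_getElem?_getD, List.getElem?_append_left hj2,
            ← List.getD_eq_getElem?_getD, hv2]
      · have hj' : j = n + 1 := by omega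
        subst hj'
        have hchain := chainSZ_step (n+1) (by omega)
        rw [← hp] at hchain
        constructor
        · rw [List.getD_eq_getElem?_getD, List.getElem?_append_right (by omega),
            hl1]
          simp [hchain]
        · rw [List.getD_eq_getElem?_getD, List.getElem?_append_right (by omega),
            hl2]
          simp [hchain]
          ring

-- ===== VERDICT (by name: the statement is the Claim_ definition above) =====
theorem solution_spec : Claim_equal_solution := by
  intro s _ hpre
  unfold Spec_solution
  by_cases h1 : s.toList = ['1']
  · simp [solution, solution_alt, pvAOuter, h1]
  · have hcount : 0 < s.toList.count '1' := List.count_pos_iff.mpr hpre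
    set n : Nat := s.toList.count '1' with hn
    have hle : n ≤ s.toList.length := List.count_le_length
    unfold solution solution_alt
    rw [if_neg h1]
    -- A side: one unfolding of the outer loop, then A_loop
    rw [show s.toList.length + 2 = s.toList.length + 1 + 1 from rfl,
      pvAOuter_step (s.toList.length + 1) s.toList 0 0 h1]
    simp only [chars_count_single, ← hn]
    have hA := A_loop (s.toList.length + 1) ((n : Int)) (0 + 1)
      (0 + (s.toList.count '0' : Int)) (by exact_mod_cast hcount)
      (by rw [Int.toNat_natCast]; omega)
    rw [Int.toNat_natCast] at hA
    rw [Int.toNat_natCast, hA]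
    -- B side: table lookup via B_tab
    obtain ⟨_, _, hv⟩ := B_tab n (by omega)
    obtain ⟨hv1, hv2⟩ := hv n le_rfl
    rw [PySem.List.pyGetD_natCast, PySem.List.pyGetD_natCast, hv1, hv2]
    simp only [List.cons.injEq, and_true]
    constructor <;> ring
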